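-- pv_equiv track=rewrite | github.com/tontide1/Legal-RAG | src/NER/prepare_phase1_dataset.py | count_entities
-- ===== SOURCE A (Python) =====
-- LABEL_B_ARTICLE = "B-ARTICLE"
--
-- LABEL_I_ARTICLE = "I-ARTICLE"
--
-- def count_entities(labels: list[str]) -> int:
--     entity_count = 0
--     in_entity = False
--     for label in labels:
--         if label == LABEL_B_ARTICLE:
--             entity_count += 1
--             in_entity = True
--             continue
--         if label == LABEL_I_ARTICLE:
--             if not in_entity:
--                 entity_count += 1
--                 in_entity = True
--             continue
--         in_entity = False
--     return entity_count
-- ===== SOURCE B (Python) =====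
-- LABEL_B_ARTICLE = "B-ARTICLE"
--
-- LABEL_I_ARTICLE = "I-ARTICLE"
--
-- def count_entities(labels: list[str]) -> int:
--     # Encode the BIO sequence as a character string, then count spans with
--     # substring counting: every "B" starts a span, and an "I" starts a span
--     # exactly when it follows an outside tag, i.e. at each "OI" occurrence
--     # in the string with an "O" sentinel prepended.
--     tags = "".join(
--         "B" if l == LABEL_B_ARTICLE else "I" if l == LABEL_I_ARTICLE else "O"
--         for l in labels
--     )
--     return tags.count("B") + ("O" + tags).count("OI")
-- ===== Notes on version B (the rewrite author's own statement) =====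
-- stated objective: alternative
-- what changed: Replaces the stateful in_entity scan with a string encoding pass (labels -> 'B'/'I'/'O' tag string) followed by library substring counting: spans = tags.count('B') + ('O'+tags).count('OI').
import Mathlib
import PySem

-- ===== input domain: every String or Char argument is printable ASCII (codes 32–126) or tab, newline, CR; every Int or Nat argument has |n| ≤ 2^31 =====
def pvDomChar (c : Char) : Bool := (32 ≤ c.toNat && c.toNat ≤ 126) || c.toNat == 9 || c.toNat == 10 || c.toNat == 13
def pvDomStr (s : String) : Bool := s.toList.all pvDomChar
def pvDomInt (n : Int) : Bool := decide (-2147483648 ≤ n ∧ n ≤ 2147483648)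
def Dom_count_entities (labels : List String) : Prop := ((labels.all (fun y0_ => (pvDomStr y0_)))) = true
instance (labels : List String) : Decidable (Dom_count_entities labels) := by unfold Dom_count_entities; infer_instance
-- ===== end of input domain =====

-- B replaces A's stateful flag-carrying scan by encoding the labels as a
-- 'B'/'I'/'O' tag string and counting spans with substring counting
-- (count of "B" plus count of "OI" after an "O" sentinel); alternative
-- decomposition, same O(n) cost.

-- ===== PORT A =====
-- A's loop body: state is (entity_count, in_entity)
def ceStepA (s : Int × Bool) (label : String) : Int × Bool :=
  if label == "B-ARTICLE" then (s.1 + 1, true)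
  else if label == "I-ARTICLE" then (if !s.2 then (s.1 + 1, true) else s)
  else (s.1, false)

def count_entities (labels : List String) : Int :=
  (labels.foldl ceStepA (0, false)).1

-- ===== PORT B =====
-- B's per-label tag character ('B' / 'I' / 'O')
def ceTag (l : String) : Char :=
  if l == "B-ARTICLE" then 'B' else if l == "I-ARTICLE" then 'I' else 'O'

-- str.count is PySem.Chars.count on the code points (Str.count = Chars.count
-- on .toList, exact); the join "".join(...) is the tag character list itself.
def count_entities_alt (labels : List String) : Int :=
  let tags : List Char := labels.map ceTag
  (PySem.Chars.count tags ['B'] : Int)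
    + (PySem.Chars.count ('O' :: tags) ['O', 'I'] : Int)

-- ===== PRECONDITION & SPEC =====
def Spec_count_entities (labels : List String) (out : Int) : Prop := out = count_entities_alt labels
instance (labels : List String) (out : Int) : Decidable (Spec_count_entities labels out) := by unfold Spec_count_entities; infer_instance

-- ===== CLAIM (what is proved, stated in full; the proofs are below) =====
def Claim_equal_count_entities : Prop := ∀ (labels : List String), Dom_count_entities labels → Spec_count_entities labels (count_entities labels)

-- ===== LEMMAS AND PROOFS =====

-- number of adjacent ('O','I') pairs in a char list
def oiPairs : List Char → Nat
  | a :: b :: t => (if a = 'O' ∧ b = 'I' then 1 else 0) + oiPairs (b :: t)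
  | _ => 0

theorem oiPairs_i_cons (t : List Char) : oiPairs ('I' :: t) = oiPairs t := by
  cases t with
  | nil => rfl
  | cons b r => simp [oiPairs]

theorem go_single_b (s : List Char) : ∀ (fuel acc : Nat), s.length ≤ fuel →
    PySem.Chars.count.go ['B'] fuel s acc = acc + s.count 'B' := by
  induction s with
  | nil => intro fuel acc _; cases fuel <;> simp [PySem.Chars.count.go]
  | cons a t ih =>
    intro fuel acc h
    cases fuel with
    | zero => simp at h
    | succ f =>
      by_cases hb : a = 'B'
      · subst hb
        rw [show PySem.Chars.count.go ['B'] (f + 1) ('B' :: t) acc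
              = PySem.Chars.count.go ['B'] f t (acc + 1) by
            simp [PySem.Chars.count.go, List.isPrefixOf]]
        rw [ih f (acc + 1) (by simpa using h)]
        simp
        omega
      · have hb' : ¬('B' = a) := fun h => hb h.symm
        rw [show PySem.Chars.count.go ['B'] (f + 1) (a :: t) acc
              = PySem.Chars.count.go ['B'] f t acc by
            simp [PySem.Chars.count.go, List.isPrefixOf, hb']]
        rw [ih f acc (by simpa using h)]
        simp [hb]

theorem go_oi (fuel : Nat) : ∀ (s : List Char) (acc : Nat), s.length ≤ fuel →
    PySem.Chars.count.go ['O', 'I'] fuel s acc = acc + oiPairs s := by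
  induction fuel with
  | zero =>
    intro s acc h
    have : s = [] := by cases s <;> simp_all
    subst this; simp [PySem.Chars.count.go, oiPairs]
  | succ f ih =>
    intro s acc h
    cases s with
    | nil => simp [PySem.Chars.count.go, oiPairs]
    | cons a t =>
      by_cases hm : ['O', 'I'].isPrefixOf (a :: t) = true
      · obtain ⟨r, hr⟩ : ∃ r, a :: t = 'O' :: 'I' :: r := by
          cases t with
          | nil => simp [List.isPrefixOf] at hm
          | cons b r =>
            simp [List.isPrefixOf] at hm
            exact ⟨r, by rw [← hm.1, ← hm.2]⟩
        cases hr
        rw [show PySem.Chars.count.go ['O', 'I'] (f + 1) ('O' :: 'I' :: r) acc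
              = PySem.Chars.count.go ['O', 'I'] f r (acc + 1) by
            simp [PySem.Chars.count.go, List.isPrefixOf]]
        rw [ih r (acc + 1) (by simp at h; omega)]
        have : oiPairs ('O' :: 'I' :: r) = 1 + oiPairs r := by
          simp [oiPairs, oiPairs_i_cons]
        omega
      · rw [show PySem.Chars.count.go ['O', 'I'] (f + 1) (a :: t) acc
              = PySem.Chars.count.go ['O', 'I'] f t acc by
            simp only [PySem.Chars.count.go]
            rw [if_neg hm]]
        rw [ih t acc (by simp at h; omega)]
        have : oiPairs (a :: t) = oiPairs t := by
          cases t with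
          | nil => rfl
          | cons b r =>
            have : ¬(a = 'O' ∧ b = 'I') := by
              intro ⟨h1, h2⟩
              exact hm (by simp [h1, h2, List.isPrefixOf])
            simp [oiPairs, this]
        omega

-- A's fold, started with flag (p == 'B' || p == 'I'), counts B tags plus OI pairs
theorem ce_fold_eq (ls : List String) : ∀ (c : Int) (p : Char),
    p = 'B' ∨ p = 'I' ∨ p = 'O' →
    (ls.foldl ceStepA (c, p == 'B' || p == 'I')).1
      = c + ((ls.map ceTag).count 'B' : Int) + (oiPairs (p :: ls.map ceTag) : Int) := by
  induction ls with
  | nil => intro c p _; simp [oiPairs]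
  | cons l t ih =>
    intro c p hp3
    rw [List.foldl_cons, List.map_cons]
    by_cases hb : l = "B-ARTICLE"
    · subst hb
      have h1 : ceStepA (c, p == 'B' || p == 'I') "B-ARTICLE" = (c + 1, true) := by
        simp [ceStepA]
      have h2 : (true : Bool) = ('B' == 'B' || 'B' == 'I') := by decide
      have htag : ceTag "B-ARTICLE" = 'B' := by simp [ceTag]
      rw [h1, h2, ih (c + 1) 'B' (Or.inl rfl), htag]
      have : oiPairs (p :: 'B' :: t.map ceTag) = oiPairs ('B' :: t.map ceTag) := by
        simp [oiPairs]
      rw [this]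
      simp
      omega
    · by_cases hi : l = "I-ARTICLE"
      · subst hi
        have htag : ceTag "I-ARTICLE" = 'I' := by decide
        by_cases hp : p = 'B' ∨ p = 'I'
        · have hpb : (p == 'B' || p == 'I') = true := by
            rcases hp with h | h <;> simp [h]
          have h1 : ceStepA (c, p == 'B' || p == 'I') "I-ARTICLE" = (c, true) := by
            rw [hpb]; simp [ceStepA]
          have h2 : (true : Bool) = ('I' == 'B' || 'I' == 'I') := by decide
          rw [h1, h2, ih c 'I' (Or.inr (Or.inl rfl)), htag]
          have hpo : ¬(p = 'O') := by rcases hp with h | h <;> subst h <;> decide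
          have : oiPairs (p :: 'I' :: t.map ceTag) = oiPairs ('I' :: t.map ceTag) := by
            simp [oiPairs, hpo]
          rw [this]
          simp
        · rw [not_or] at hp
          have hpb : (p == 'B' || p == 'I') = false := by simp [hp.1, hp.2]
          have h1 : ceStepA (c, p == 'B' || p == 'I') "I-ARTICLE" = (c + 1, true) := by
            rw [hpb]; simp [ceStepA]
          have h2 : (true : Bool) = ('I' == 'B' || 'I' == 'I') := by decide
          rw [h1, h2, ih (c + 1) 'I' (Or.inr (Or.inl rfl)), htag]
          have ho : p = 'O' := by
            rcases hp3 with h | h | h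
            · exact absurd h hp.1
            · exact absurd h hp.2
            · exact h
          have : oiPairs (p :: 'I' :: t.map ceTag) = 1 + oiPairs ('I' :: t.map ceTag) := by
            simp [oiPairs, ho]
          rw [this]
          simp
          omega
      · have htag : ceTag l = 'O' := by simp [ceTag, hb, hi]
        have h1 : ceStepA (c, p == 'B' || p == 'I') l = (c, false) := by
          simp [ceStepA, hb, hi]
        have h2 : (false : Bool) = ('O' == 'B' || 'O' == 'I') := by decide
        rw [h1, h2, ih c 'O' (Or.inr (Or.inr rfl)), htag]
        have : oiPairs (p :: 'O' :: t.map ceTag) = oiPairs ('O' :: t.map ceTag) := by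
          simp [oiPairs]
        rw [this]
        simp

-- wrappers: Chars.count on the two literal patterns
theorem count_single_b (s : List Char) : PySem.Chars.count s ['B'] = s.count 'B' := by
  have h := go_single_b s s.length 0 le_rfl
  simpa [PySem.Chars.count] using h

theorem count_oi (s : List Char) : PySem.Chars.count s ['O', 'I'] = oiPairs s := by
  have h := go_oi s.length s 0 le_rfl
  simpa [PySem.Chars.count] using h

-- ===== VERDICT (by name: the statement is the Claim_ definition above) =====
theorem count_entities_spec : Claim_equal_count_entities := by
  intro labels _
  unfold Spec_count_entities count_entities count_entities_alt
  have hfold := ce_fold_eq labels 0 'O' (Or.inr (Or.inr rfl))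
  have hflag : (('O' : Char) == 'B' || ('O' : Char) == 'I') = false := by decide
  rw [hflag] at hfold
  simp only [count_single_b, count_oi]
  omega
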